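-- pv_equiv track=rewrite | github.com/luke-avionics/autoai2c | fpga_dedicated_nips/diff_space_college_try.py | tiling_translation_dw
-- ===== SOURCE A (Python) =====
-- import math
--
-- def tiling_translation_dw(consumption_dict, input_dnn):
--     tiling_str = []
--     for layer in input_dnn:
--         tiling_str.append({})
--         for i in consumption_dict:
--             if "rf" in i:
--                 tiling_str[-1][i]=min(consumption_dict[i],layer[1][str(i)[:-3]][0])
--         for i in consumption_dict:
--             if "noc" in i:
--                 tiling_str[-1][i]=min(consumption_dict[i],math.ceil(layer[1][str(i)[:-4]][0]/tiling_str[-1][str(i)[:-4]+"_rf"]))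
--         for i in consumption_dict:
--             if "gb" in i:
--                 try:
--                     tiling_str[-1][i] = min(consumption_dict[i],
--                                         math.ceil(layer[1][str(i)[:-3]][0] / tiling_str[-1][str(i)[:-3] + "_noc"]/tiling_str[-1][str(i)[:-3] + "_rf"]))
--                 except KeyError:
--                     tiling_str[-1][i] = min(consumption_dict[i],
--                                             math.ceil(layer[1][str(i)[:-3]][0] /
--                                                       tiling_str[-1][str(i)[:-3] + "_rf"]))
--                 except:
--                     raise
--         tiling_str[-1]['batch_rf']=tiling_str[-1]['batch_gb']=1
--         consumption_dict['batch_rf']=consumption_dict['batch_gb']=1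
--         dram_list=['col_out_dram', 'ch_out_dram', 'batch_dram','row_out_dram','col_kernel_dram','row_kernel_dram']
--         for i in dram_list:
--             consumption_dict[i]=1
--             try:
--                 tiling_str[-1][i] =math.ceil(layer[1][str(i)[:-5]][0] / tiling_str[-1][str(i)[:-5] + "_gb"]/ tiling_str[-1][str(i)[:-5] + "_noc"] / tiling_str[-1][
--                                             str(i)[:-5] + "_rf"])
--             except KeyError:
--                 tiling_str[-1][i] =math.ceil(layer[1][str(i)[:-5]][0] / tiling_str[-1][str(i)[:-5] + "_gb"]/ tiling_str[-1][
--                                             str(i)[:-5] + "_rf"])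
--             except:
--                 raise
--     return tiling_str,consumption_dict
-- ===== SOURCE B (Python) =====
-- def tiling_translation_dw(consumption_dict, input_dnn):
--     # NOTE: like the original, this mutates consumption_dict in place (batch_rf/batch_gb
--     # and the six *_dram entries are set to 1) and returns it as the second component.
--     dram_bases = ['col_out', 'ch_out', 'batch', 'row_out', 'col_kernel', 'row_kernel']
--     tiling_str = []
--     for layer in input_dnn:
--         tiling_str.append(_layer_tiling(consumption_dict, layer[1], dram_bases))
--         # in-place mutation, once per layer exactly as the original does
--         consumption_dict['batch_rf'] = consumption_dict['batch_gb'] = 1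
--         for b in dram_bases:
--             consumption_dict[b + '_dram'] = 1
--     return tiling_str, consumption_dict
--
--
-- def _ceildiv(a, d):
--     # exact integer ceiling of a/d (d != 0), no floats
--     return -(-a // d)
--
--
-- def _rf(cons, dims, b):
--     return min(cons[b + '_rf'], dims[b][0])
--
--
-- def _noc(cons, dims, b):
--     return min(cons[b + '_noc'], _ceildiv(dims[b][0], _rf(cons, dims, b)))
--
--
-- def _gb(cons, dims, b):
--     if b + '_noc' in cons:
--         den = _noc(cons, dims, b) * _rf(cons, dims, b)
--     else:
--         den = _rf(cons, dims, b)
--     return min(cons[b + '_gb'], _ceildiv(dims[b][0], den))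
--
--
-- def _dram(cons, dims, b):
--     # the batch factors are pinned to 1 before the dram row is computed
--     gbv = 1 if b == 'batch' else _gb(cons, dims, b)
--     rfv = 1 if b == 'batch' else _rf(cons, dims, b)
--     if b + '_noc' in cons:
--         den = gbv * _noc(cons, dims, b) * rfv
--     else:
--         den = gbv * rfv
--     return _ceildiv(dims[b][0], den)
--
--
-- def _layer_tiling(cons, dims, dram_bases):
--     # every tiling factor is a closed-form function of (cons, dims); one classifying
--     # pass collects the rf / noc / gb rows, then the dict is assembled in one go
--     rf_row, noc_row, gb_row = [], [], []
--     for k, v in cons.items():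
--         if 'rf' in k:
--             rf_row.append((k, min(v, dims[k[:-3]][0])))
--         elif 'noc' in k:
--             b = k[:-4]
--             noc_row.append((k, min(v, _ceildiv(dims[b][0], _rf(cons, dims, b)))))
--         elif 'gb' in k:
--             b = k[:-3]
--             if b + '_noc' in cons:
--                 den = _noc(cons, dims, b) * _rf(cons, dims, b)
--             else:
--                 den = _rf(cons, dims, b)
--             gb_row.append((k, min(v, _ceildiv(dims[b][0], den))))
--     t = dict(rf_row + noc_row + gb_row)
--     t['batch_rf'] = t['batch_gb'] = 1
--     for b in dram_bases:
--         t[b + '_dram'] = _dram(cons, dims, b)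
--     return t
-- ===== Notes on version B (the rewrite author's own statement) =====
-- stated objective: alternative
-- what changed: A threads a growing tiling dict through three substring-filtered scans plus a dram loop that all read earlier entries back out of that dict (with try/except KeyError probing and float math.ceil chains); B never reads the dict it is building: every rf/noc/gb/dram factor is a closed-form function of (consumption_dict, layer dims) via helper formulas, collected in ONE classifying pass (if/elif) and assembled into the dict in one go, with membership tests instead of try/except and exact integer ceiling division -(-a//d) instead of float math.ceil.
import Mathlib
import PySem

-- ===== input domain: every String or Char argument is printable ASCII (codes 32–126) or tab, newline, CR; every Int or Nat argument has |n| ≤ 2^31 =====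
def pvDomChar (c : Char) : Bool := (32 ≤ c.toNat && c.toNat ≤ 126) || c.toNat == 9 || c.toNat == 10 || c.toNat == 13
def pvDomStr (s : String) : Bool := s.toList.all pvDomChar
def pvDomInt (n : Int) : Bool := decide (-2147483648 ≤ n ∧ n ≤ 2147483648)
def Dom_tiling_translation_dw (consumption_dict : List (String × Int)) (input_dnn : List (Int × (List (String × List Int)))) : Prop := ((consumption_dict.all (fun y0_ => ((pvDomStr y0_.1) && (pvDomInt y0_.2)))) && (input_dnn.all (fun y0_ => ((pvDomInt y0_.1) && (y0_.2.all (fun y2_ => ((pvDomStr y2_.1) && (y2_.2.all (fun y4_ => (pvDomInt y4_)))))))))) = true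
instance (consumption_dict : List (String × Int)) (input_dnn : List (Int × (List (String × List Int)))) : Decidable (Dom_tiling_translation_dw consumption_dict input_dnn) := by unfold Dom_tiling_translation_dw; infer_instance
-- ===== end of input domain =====

-- A threads a growing per-layer tiling dict through three substring-filtered scans plus a
-- dram loop that read earlier entries back out of that dict; B never reads the dict it is
-- building: every factor is a closed-form function of (consumption_dict, layer dims),
-- collected in one classifying pass and assembled in one go (objective: alternative, same
-- cost). Both A and B mutate the consumption_dict argument in place; the proved equivalence
-- covers the returned pair (which includes that dict's final contents).

-- shared pure helpers (arithmetic / string slicing used identically by both sources)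
-- math.ceil(a/d) (and the chained a/d1/d2… with d = d1*d2*…) ported as exact integer
-- ceiling division: exact for the positive numerators/divisors |·| ≤ 2^31 admitted by Pre_
def pvCeilDiv (a d : Int) : Int := -(PySem.Int.floordiv (-a) d)
-- k[:-n]
def pvBase (k : String) (n : Int) : String := PySem.Str.slice k none (some (-n))
-- "sub in k"
def pvHas (sub k : String) : Bool := PySem.Str.isIn sub k
def pvDramList : List String := ["col_out_dram", "ch_out_dram", "batch_dram", "row_out_dram", "col_kernel_dram", "row_kernel_dram"]
-- layer[1][b][0]; the getD defaults are only reached outside Pre_ (KeyError/IndexError in Python)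
def pvDim (d : PySem.Dict String (List Int)) (b : String) : Int := PySem.List.pyGetD (d.getD b []) 0 0

-- ===== PORT A =====
-- one layer of A's loop body: three scans over the consumption dict guarded by substring
-- tests, then the batch/dram mutations; t-lookups that would raise KeyError use getD 1 /
-- get? with the except-KeyError fallback rendered as the none branch (exact inside Pre_)
def pvLayerA (c : PySem.Dict String Int) (d : PySem.Dict String (List Int)) :
    PySem.Dict String Int × PySem.Dict String Int :=
  let t0 := c.items.foldl (fun t kv =>
      if pvHas "rf" kv.1 then t.insert kv.1 (min kv.2 (pvDim d (pvBase kv.1 3))) else t)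
    PySem.Dict.empty
  let t1 := c.items.foldl (fun t kv =>
      if pvHas "noc" kv.1 then
        t.insert kv.1 (min kv.2 (pvCeilDiv (pvDim d (pvBase kv.1 4)) (t.getD (pvBase kv.1 4 ++ "_rf") 1)))
      else t) t0
  let t2 := c.items.foldl (fun t kv =>
      if pvHas "gb" kv.1 then
        t.insert kv.1 (min kv.2
          (match t.get? (pvBase kv.1 3 ++ "_noc") with
           | some noc => pvCeilDiv (pvDim d (pvBase kv.1 3)) (noc * t.getD (pvBase kv.1 3 ++ "_rf") 1)
           | none => pvCeilDiv (pvDim d (pvBase kv.1 3)) (t.getD (pvBase kv.1 3 ++ "_rf") 1)))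
      else t) t1
  let t3 := (t2.insert "batch_rf" 1).insert "batch_gb" 1
  let c1 := (c.insert "batch_rf" 1).insert "batch_gb" 1
  pvDramList.foldl (fun tc k =>
      (tc.1.insert k
        (match tc.1.get? (pvBase k 5 ++ "_noc") with
         | some noc => pvCeilDiv (pvDim d (pvBase k 5)) (tc.1.getD (pvBase k 5 ++ "_gb") 1 * noc * tc.1.getD (pvBase k 5 ++ "_rf") 1)
         | none => pvCeilDiv (pvDim d (pvBase k 5)) (tc.1.getD (pvBase k 5 ++ "_gb") 1 * tc.1.getD (pvBase k 5 ++ "_rf") 1)),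
       tc.2.insert k 1)) (t3, c1)

def tiling_translation_dw (consumption_dict : List (String × Int)) (input_dnn : List (Int × (List (String × List Int)))) : (List (List (String × Int))) × (List (String × Int)) :=
  let r := input_dnn.foldl (fun acc layer =>
      let s := pvLayerA acc.2 (PySem.Dict.ofList layer.2)
      (acc.1 ++ [s.1], s.2))
    (([] : List (PySem.Dict String Int)), PySem.Dict.ofList consumption_dict)
  (r.1.map (fun t => t.items), r.2.items)

-- ===== PORT B =====
-- B's closed-form factors: each reads only the consumption dict and the layer dims
-- (cons[...] lookups that would raise KeyError are rendered as the none → 1 branch,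
-- exact inside Pre_, where those companion keys are present)
def pvDramBases : List String := ["col_out", "ch_out", "batch", "row_out", "col_kernel", "row_kernel"]

def pvRfOf (c : PySem.Dict String Int) (d : PySem.Dict String (List Int)) (b : String) : Int :=
  match c.get? (b ++ "_rf") with
  | some v => min v (pvDim d b)
  | none => 1

def pvNocOf (c : PySem.Dict String Int) (d : PySem.Dict String (List Int)) (b : String) : Int :=
  match c.get? (b ++ "_noc") with
  | some v => min v (pvCeilDiv (pvDim d b) (pvRfOf c d b))
  | none => 1

def pvGbOf (c : PySem.Dict String Int) (d : PySem.Dict String (List Int)) (b : String) : Int :=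
  match c.get? (b ++ "_gb") with
  | some v => min v (pvCeilDiv (pvDim d b)
      (if c.contains (b ++ "_noc") then pvNocOf c d b * pvRfOf c d b else pvRfOf c d b))
  | none => 1

def pvDramOf (c : PySem.Dict String Int) (d : PySem.Dict String (List Int)) (b : String) : Int :=
  let gbv : Int := if b == "batch" then 1 else pvGbOf c d b
  let rfv : Int := if b == "batch" then 1 else pvRfOf c d b
  if c.contains (b ++ "_noc") then pvCeilDiv (pvDim d b) (gbv * pvNocOf c d b * rfv)
  else pvCeilDiv (pvDim d b) (gbv * rfv)

-- B's single classifying pass: one if/elif over the consumption items, each row value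
-- computed on the spot by the closed forms above (never read back from the dict being built)
def pvRowsStep (c : PySem.Dict String Int) (d : PySem.Dict String (List Int))
    (acc : List (String × Int) × List (String × Int) × List (String × Int))
    (kv : String × Int) : List (String × Int) × List (String × Int) × List (String × Int) :=
  if pvHas "rf" kv.1 then
    (acc.1 ++ [(kv.1, min kv.2 (pvDim d (pvBase kv.1 3)))], acc.2.1, acc.2.2)
  else if pvHas "noc" kv.1 then
    (acc.1, acc.2.1 ++ [(kv.1, min kv.2 (pvCeilDiv (pvDim d (pvBase kv.1 4)) (pvRfOf c d (pvBase kv.1 4))))], acc.2.2)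
  else if pvHas "gb" kv.1 then
    (acc.1, acc.2.1, acc.2.2 ++ [(kv.1, min kv.2 (pvCeilDiv (pvDim d (pvBase kv.1 3))
        (if c.contains (pvBase kv.1 3 ++ "_noc") then pvNocOf c d (pvBase kv.1 3) * pvRfOf c d (pvBase kv.1 3)
         else pvRfOf c d (pvBase kv.1 3))))])
  else acc

def pvLayerB (c : PySem.Dict String Int) (d : PySem.Dict String (List Int)) : PySem.Dict String Int :=
  let rows := c.items.foldl (pvRowsStep c d) ([], [], [])
  let t := PySem.Dict.ofList (rows.1 ++ rows.2.1 ++ rows.2.2)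
  let t := (t.insert "batch_rf" 1).insert "batch_gb" 1
  pvDramBases.foldl (fun t b => t.insert (b ++ "_dram") (pvDramOf c d b)) t

-- B's in-place consumption_dict mutation, once per layer
def pvMutB (c : PySem.Dict String Int) : PySem.Dict String Int :=
  pvDramBases.foldl (fun c b => c.insert (b ++ "_dram") 1) ((c.insert "batch_rf" 1).insert "batch_gb" 1)

-- B's layer loop (the mutated consumption dict is threaded as state)
def pvLayersB (c : PySem.Dict String Int) :
    List (Int × (List (String × List Int))) → List (PySem.Dict String Int) × PySem.Dict String Int
  | [] => ([], c)
  | layer :: rest =>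
      let t := pvLayerB c (PySem.Dict.ofList layer.2)
      let r := pvLayersB (pvMutB c) rest
      (t :: r.1, r.2)

def tiling_translation_dw_alt (consumption_dict : List (String × Int)) (input_dnn : List (Int × (List (String × List Int)))) : (List (List (String × Int))) × (List (String × Int)) :=
  let r := pvLayersB (PySem.Dict.ofList consumption_dict) input_dnn
  (r.1.map (fun t => t.items), r.2.items)

-- ===== PRECONDITION & SPEC =====
-- layer dims has key b, with a nonempty list whose head is ≥ 1
def pvDimOK (d : List (String × List Int)) (b : String) : Bool :=
  match (PySem.Dict.ofList d).get? b with
  | some (x :: _) => decide (1 ≤ x)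
  | _ => false

-- a consumption key is unambiguously classified: it contains at most one of the three
-- tier substrings "rf"/"noc"/"gb"
abbrev pvShapeKey (k : String) : Prop :=
  (pvHas "rf" k = true → pvHas "noc" k = false ∧ pvHas "gb" k = false) ∧
  (pvHas "noc" k = true → pvHas "gb" k = false)

-- Pre_ excludes (a) the inputs on which A raises — KeyError/IndexError for a missing
-- companion key or layer dim, and ZeroDivisionError, approximated in closed form by
-- requiring the consumed values to be positive (so on excluded inputs where every divisor
-- happens to stay nonzero A still returns, and B returns the same value there) — and
-- (b) consumption keys containing more than one of the substrings "rf"/"noc"/"gb", on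
-- which A's reclassification of one key by several passes (an overwrite whose result
-- depends on pass order) is accidental; B classifies each key once.
def Pre_tiling_translation_dw (consumption_dict : List (String × Int)) (input_dnn : List (Int × (List (String × List Int)))) : Prop :=
  input_dnn = [] ∨
  ((∀ k ∈ (PySem.Dict.ofList consumption_dict).keys, pvShapeKey k) ∧
   (∀ kv ∈ (PySem.Dict.ofList consumption_dict).items,
      (pvHas "rf" kv.1 = true ∨ pvHas "noc" kv.1 = true ∨ pvHas "gb" kv.1 = true) → 1 ≤ kv.2) ∧
   (∀ k ∈ (PySem.Dict.ofList consumption_dict).keys,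
      (pvHas "noc" k = true → (pvBase k 4 ++ "_rf") ∈ (PySem.Dict.ofList consumption_dict).keys) ∧
      (pvHas "gb" k = true → (pvBase k 3 ++ "_rf") ∈ (PySem.Dict.ofList consumption_dict).keys)) ∧
   (∀ b ∈ pvDramBases, b = "batch" ∨
      ((b ++ "_gb") ∈ (PySem.Dict.ofList consumption_dict).keys ∧
       (b ++ "_rf") ∈ (PySem.Dict.ofList consumption_dict).keys)) ∧
   (∀ layer ∈ input_dnn,
      (∀ k ∈ (PySem.Dict.ofList consumption_dict).keys,
         (pvHas "rf" k = true → pvDimOK layer.2 (pvBase k 3) = true) ∧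
         (pvHas "noc" k = true → pvDimOK layer.2 (pvBase k 4) = true) ∧
         (pvHas "gb" k = true → pvDimOK layer.2 (pvBase k 3) = true)) ∧
      (∀ b ∈ pvDramBases, pvDimOK layer.2 b = true)))
instance (consumption_dict : List (String × Int)) (input_dnn : List (Int × (List (String × List Int)))) : Decidable (Pre_tiling_translation_dw consumption_dict input_dnn) := by unfold Pre_tiling_translation_dw; infer_instance

def pvWitness_tiling_translation_dw : (List (String × Int)) × (List (Int × (List (String × List Int)))) :=
  ([("ch_out_rf", 4), ("ch_out_noc", 2), ("ch_out_gb", 8), ("col_out_rf", 3), ("col_out_gb", 2),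
    ("row_out_rf", 2), ("row_out_gb", 2), ("col_kernel_rf", 3), ("col_kernel_gb", 1),
    ("row_kernel_rf", 3), ("row_kernel_gb", 1)],
   [(0, [("ch_out", [16]), ("col_out", [8]), ("row_out", [8]), ("col_kernel", [3]),
         ("row_kernel", [3]), ("batch", [4])])])

def Spec_tiling_translation_dw (consumption_dict : List (String × Int)) (input_dnn : List (Int × (List (String × List Int)))) (out : (List (List (String × Int))) × (List (String × Int))) : Prop := out = tiling_translation_dw_alt consumption_dict input_dnn
instance (consumption_dict : List (String × Int)) (input_dnn : List (Int × (List (String × List Int)))) (out : (List (List (String × Int))) × (List (String × Int))) : Decidable (Spec_tiling_translation_dw consumption_dict input_dnn out) := by unfold Spec_tiling_translation_dw; infer_instance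

-- ===== CLAIM (what is proved, stated in full; the proofs are below) =====
def Claim_equal_tiling_translation_dw : Prop := ∀ (consumption_dict : List (String × Int)) (input_dnn : List (Int × (List (String × List Int)))), Dom_tiling_translation_dw consumption_dict input_dnn → Pre_tiling_translation_dw consumption_dict input_dnn → Spec_tiling_translation_dw consumption_dict input_dnn (tiling_translation_dw consumption_dict input_dnn)

-- ===== LEMMAS AND PROOFS =====

-- ---- generic fold/lookup lemmas ----
theorem pvGet?_foldl_insert_of_ne {α : Type} (l : List α) (key : α → String)
    (f : PySem.Dict String Int → α → Int) (q : String) :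
    ∀ (t : PySem.Dict String Int), (∀ a ∈ l, key a ≠ q) →
    (l.foldl (fun t a => t.insert (key a) (f t a)) t).get? q = t.get? q := by
  induction l with
  | nil => intro t _; rfl
  | cons a tl ih =>
      intro t h
      simp only [List.foldl_cons]
      rw [ih _ (fun b hb => h b (List.mem_cons_of_mem _ hb))]
      exact PySem.Dict.get?_insert_of_ne _ _ (fun he => h a (List.mem_cons_self) he.symm)

theorem pvGet?_foldl_insert_pure_mem {α : Type} (l : List α) (key : α → String) (g : α → Int)
    (hnd : (l.map key).Nodup) (a : α) (ha : a ∈ l) :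
    ∀ (t : PySem.Dict String Int),
    (l.foldl (fun t a => t.insert (key a) (g a)) t).get? (key a) = some (g a) := by
  induction l with
  | nil => cases ha
  | cons b tl ih =>
      intro t
      simp only [List.map_cons, List.nodup_cons] at hnd
      simp only [List.foldl_cons]
      rcases List.mem_cons.mp ha with rfl | ha'
      · rw [pvGet?_foldl_insert_of_ne tl key (fun _ x => g x) (key a)
            (t.insert (key a) (g a)) (fun x hx he => hnd.1 (he ▸ List.mem_map_of_mem hx))]
        simp [PySem.Dict.get?_insert_self]
      · exact ih hnd.2 ha' _

theorem pvFoldConv {α : Type} (P : String → Bool) (key : α → String)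
    (f : PySem.Dict String Int → α → Int) (g : α → Int) (l : List α) :
    ∀ (t : PySem.Dict String Int),
    (∀ a ∈ l, P (key a) = false) →
    (∀ (t' : PySem.Dict String Int), ∀ a ∈ l,
        (∀ q, P q = true → t'.get? q = t.get? q) → f t' a = g a) →
    l.foldl (fun t' a => t'.insert (key a) (f t' a)) t
      = l.foldl (fun t' a => t'.insert (key a) (g a)) t := by
  induction l with
  | nil => intro t _ _; rfl
  | cons a tl ih =>
      intro t hP hf
      simp only [List.foldl_cons]
      rw [hf t a (List.mem_cons_self) (fun _ _ => rfl)]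
      apply ih
      · exact fun b hb => hP b (List.mem_cons_of_mem _ hb)
      · intro t' b hb hinv
        apply hf t' b (List.mem_cons_of_mem _ hb)
        intro q hq
        rw [hinv q hq]
        exact PySem.Dict.get?_insert_of_ne _ _ (fun he => by
          have := hP a (List.mem_cons_self); rw [← he] at this; rw [hq] at this; cases this)

-- ---- string slicing / substring facts about the three suffixes ----
theorem pvBase_rf (b : String) : pvBase (b ++ "_rf") 3 = b := by
  apply String.toList_inj.mp
  unfold pvBase
  rw [PySem.Str.toList_slice]
  simp only [PySem.Chars.slice_eq_listSlice]
  rw [PySem.List.slice_to_neg_ofNat _ 3 (by omega)]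
  simp
theorem pvBase_noc (b : String) : pvBase (b ++ "_noc") 4 = b := by
  apply String.toList_inj.mp
  unfold pvBase
  rw [PySem.Str.toList_slice]
  simp only [PySem.Chars.slice_eq_listSlice]
  rw [PySem.List.slice_to_neg_ofNat _ 4 (by omega)]
  simp
theorem pvBase_gb (b : String) : pvBase (b ++ "_gb") 3 = b := by
  apply String.toList_inj.mp
  unfold pvBase
  rw [PySem.Str.toList_slice]
  simp only [PySem.Chars.slice_eq_listSlice]
  rw [PySem.List.slice_to_neg_ofNat _ 3 (by omega)]
  simp
theorem pvHas_rf_append (b : String) : pvHas "rf" (b ++ "_rf") = true := by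
  unfold pvHas
  rw [PySem.Str.isIn_iff_infix]
  exact ⟨b.toList ++ ['_'], [], by simp⟩
theorem pvHas_noc_append (b : String) : pvHas "noc" (b ++ "_noc") = true := by
  unfold pvHas
  rw [PySem.Str.isIn_iff_infix]
  exact ⟨b.toList ++ ['_'], [], by simp⟩
theorem pvHas_gb_append (b : String) : pvHas "gb" (b ++ "_gb") = true := by
  unfold pvHas
  rw [PySem.Str.isIn_iff_infix]
  exact ⟨b.toList ++ ['_'], [], by simp⟩
-- shape helpers
theorem pvShape_of_mem (c : PySem.Dict String Int) (hsh : ∀ k ∈ c.keys, pvShapeKey k)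
    {kv : String × Int} (h : kv ∈ c.items) : pvShapeKey kv.1 :=
  hsh _ (by simpa [PySem.Dict.keys] using List.mem_map_of_mem (f := fun kv => kv.1) h)

theorem pvShape_noc_rf {k : String} (h : pvShapeKey k) (hnoc : pvHas "noc" k = true) :
    pvHas "rf" k = false := by
  cases hrf : pvHas "rf" k
  · rfl
  · exact absurd hnoc (by simp [(h.1 hrf).1])

theorem pvShape_gb_rf_noc {k : String} (h : pvShapeKey k) (hgb : pvHas "gb" k = true) :
    pvHas "rf" k = false ∧ pvHas "noc" k = false := by
  refine ⟨?_, ?_⟩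
  · cases hrf : pvHas "rf" k
    · rfl
    · exact absurd hgb (by simp [(h.1 hrf).2])
  · cases hnoc : pvHas "noc" k
    · rfl
    · exact absurd hgb (by simp [h.2 hnoc])

-- ---- the canonical stages of A's per-layer computation (proof-local names) ----
def pvGr (d : PySem.Dict String (List Int)) (kv : String × Int) : Int :=
  min kv.2 (pvDim d (pvBase kv.1 3))
def pvGn (c : PySem.Dict String Int) (d : PySem.Dict String (List Int)) (kv : String × Int) : Int :=
  min kv.2 (pvCeilDiv (pvDim d (pvBase kv.1 4)) (pvRfOf c d (pvBase kv.1 4)))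
def pvGg (c : PySem.Dict String Int) (d : PySem.Dict String (List Int)) (kv : String × Int) : Int :=
  min kv.2 (pvCeilDiv (pvDim d (pvBase kv.1 3))
    (if c.contains (pvBase kv.1 3 ++ "_noc") then pvNocOf c d (pvBase kv.1 3) * pvRfOf c d (pvBase kv.1 3)
     else pvRfOf c d (pvBase kv.1 3)))

def pvT0 (c : PySem.Dict String Int) (d : PySem.Dict String (List Int)) : PySem.Dict String Int :=
  (c.items.filter (fun kv => pvHas "rf" kv.1)).foldl (fun t kv => t.insert kv.1 (pvGr d kv)) PySem.Dict.empty
def pvT1 (c : PySem.Dict String Int) (d : PySem.Dict String (List Int)) : PySem.Dict String Int :=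
  (c.items.filter (fun kv => pvHas "noc" kv.1)).foldl (fun t kv => t.insert kv.1 (pvGn c d kv)) (pvT0 c d)
def pvT2 (c : PySem.Dict String Int) (d : PySem.Dict String (List Int)) : PySem.Dict String Int :=
  (c.items.filter (fun kv => pvHas "gb" kv.1)).foldl (fun t kv => t.insert kv.1 (pvGg c d kv)) (pvT1 c d)
def pvT3 (c : PySem.Dict String Int) (d : PySem.Dict String (List Int)) : PySem.Dict String Int :=
  ((pvT2 c d).insert "batch_rf" 1).insert "batch_gb" 1

-- ---- characterizations of the stages (under unique, unambiguous keys) ----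
theorem pvT0_get (c : PySem.Dict String Int) (d : PySem.Dict String (List Int))
    (hnd : c.keys.Nodup) (q : String) (hq : pvHas "rf" q = true) :
    (pvT0 c d).get? q = (c.get? q).map (fun v => pvGr d (q, v)) := by
  unfold pvT0
  cases hc : c.get? q with
  | some v =>
      have hm : (q, v) ∈ c.items := PySem.Dict.mem_items_of_get?_eq_some _ hc
      have hf : (q, v) ∈ c.items.filter (fun kv => pvHas "rf" kv.1) :=
        List.mem_filter.mpr ⟨hm, by simpa using hq⟩
      have hndf : ((c.items.filter (fun kv => pvHas "rf" kv.1)).map (fun kv => kv.1)).Nodup := by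
        apply List.Nodup.sublist (List.Sublist.map _ List.filter_sublist)
        simpa [PySem.Dict.keys] using hnd
      simpa using pvGet?_foldl_insert_pure_mem _ (fun kv => kv.1) (pvGr d) hndf (q, v) hf PySem.Dict.empty
  | none =>
      have hq' : q ∉ c.keys := (PySem.Dict.get?_eq_none_iff_not_mem_keys _ _).mp hc
      rw [pvGet?_foldl_insert_of_ne (c.items.filter (fun kv => pvHas "rf" kv.1))
        (fun kv => kv.1) (fun _ kv => pvGr d kv) q PySem.Dict.empty (fun kv hkv he => hq' (by
          rw [← he]
          simpa [PySem.Dict.keys] using List.mem_map_of_mem (f := fun kv => kv.1) (List.mem_of_mem_filter hkv)))]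
      simp

theorem pvT1_get_rf (c : PySem.Dict String Int) (d : PySem.Dict String (List Int))
    (hsh : ∀ k ∈ c.keys, pvShapeKey k) (q : String) (hq : pvHas "rf" q = true) :
    (pvT1 c d).get? q = (pvT0 c d).get? q := by
  unfold pvT1
  refine pvGet?_foldl_insert_of_ne _ (fun kv : String × Int => kv.1) _ q _ (fun kv hkv he => ?_)
  have hnoc : pvHas "noc" kv.1 = true := by simpa using (List.mem_filter.mp hkv).2
  have hrf : pvHas "rf" kv.1 = false :=
    pvShape_noc_rf (pvShape_of_mem c hsh (List.mem_of_mem_filter hkv)) hnoc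
  simp only [] at he; rw [he, hq] at hrf; cases hrf

theorem pvT1_get_noc (c : PySem.Dict String Int) (d : PySem.Dict String (List Int))
    (hnd : c.keys.Nodup) (q : String) (hq : pvHas "noc" q = true) :
    (pvT1 c d).get? q = (c.get? q).map (fun v => pvGn c d (q, v)) := by
  unfold pvT1
  cases hc : c.get? q with
  | some v =>
      have hm : (q, v) ∈ c.items := PySem.Dict.mem_items_of_get?_eq_some _ hc
      have hf : (q, v) ∈ c.items.filter (fun kv => pvHas "noc" kv.1) :=
        List.mem_filter.mpr ⟨hm, by simpa using hq⟩
      have hndf : ((c.items.filter (fun kv => pvHas "noc" kv.1)).map (fun kv => kv.1)).Nodup := by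
        apply List.Nodup.sublist (List.Sublist.map _ List.filter_sublist)
        simpa [PySem.Dict.keys] using hnd
      simpa using pvGet?_foldl_insert_pure_mem _ (fun kv => kv.1) (pvGn c d) hndf (q, v) hf (pvT0 c d)
  | none =>
      have hq' : q ∉ c.keys := (PySem.Dict.get?_eq_none_iff_not_mem_keys _ _).mp hc
      rw [pvGet?_foldl_insert_of_ne (c.items.filter (fun kv => pvHas "noc" kv.1))
        (fun kv => kv.1) (fun _ kv => pvGn c d kv) q (pvT0 c d) (fun kv hkv he => hq' (by
          rw [← he]
          simpa [PySem.Dict.keys] using List.mem_map_of_mem (f := fun kv => kv.1) (List.mem_of_mem_filter hkv)))]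
      unfold pvT0
      rw [pvGet?_foldl_insert_of_ne (c.items.filter (fun kv => pvHas "rf" kv.1))
        (fun kv => kv.1) (fun _ kv => pvGr d kv) q PySem.Dict.empty (fun kv hkv he => hq' (by
          rw [← he]
          simpa [PySem.Dict.keys] using List.mem_map_of_mem (f := fun kv => kv.1) (List.mem_of_mem_filter hkv)))]
      simp

theorem pvT2_get_stable (c : PySem.Dict String Int) (d : PySem.Dict String (List Int))
    (hsh : ∀ k ∈ c.keys, pvShapeKey k) (q : String) (hq : pvHas "rf" q = true ∨ pvHas "noc" q = true) :
    (pvT2 c d).get? q = (pvT1 c d).get? q := by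
  unfold pvT2
  refine pvGet?_foldl_insert_of_ne _ (fun kv : String × Int => kv.1) _ q _ (fun kv hkv he => ?_)
  have hgb : pvHas "gb" kv.1 = true := by simpa using (List.mem_filter.mp hkv).2
  have h2 := pvShape_gb_rf_noc (pvShape_of_mem c hsh (List.mem_of_mem_filter hkv)) hgb
  simp only [] at he
  rcases hq with hq | hq
  · rw [he, hq] at h2; cases h2.1
  · rw [he, hq] at h2; cases h2.2

theorem pvT2_get_gb (c : PySem.Dict String Int) (d : PySem.Dict String (List Int))
    (hnd : c.keys.Nodup) (q : String) (hq : pvHas "gb" q = true) :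
    (pvT2 c d).get? q = (c.get? q).map (fun v => pvGg c d (q, v)) := by
  unfold pvT2
  cases hc : c.get? q with
  | some v =>
      have hm : (q, v) ∈ c.items := PySem.Dict.mem_items_of_get?_eq_some _ hc
      have hf : (q, v) ∈ c.items.filter (fun kv => pvHas "gb" kv.1) :=
        List.mem_filter.mpr ⟨hm, by simpa using hq⟩
      have hndf : ((c.items.filter (fun kv => pvHas "gb" kv.1)).map (fun kv => kv.1)).Nodup := by
        apply List.Nodup.sublist (List.Sublist.map _ List.filter_sublist)
        simpa [PySem.Dict.keys] using hnd
      simpa using pvGet?_foldl_insert_pure_mem _ (fun kv => kv.1) (pvGg c d) hndf (q, v) hf (pvT1 c d)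
  | none =>
      have hq' : q ∉ c.keys := (PySem.Dict.get?_eq_none_iff_not_mem_keys _ _).mp hc
      have hne : ∀ (p : String → Bool) (kv : String × Int),
          kv ∈ c.items.filter (fun kv => p kv.1) → (fun kv : String × Int => kv.1) kv ≠ q := by
        intro p kv hkv he
        exact hq' (by
          rw [← he]
          simpa [PySem.Dict.keys] using List.mem_map_of_mem (f := fun kv => kv.1) (List.mem_of_mem_filter hkv))
      rw [pvGet?_foldl_insert_of_ne _ (fun kv => kv.1) (fun _ kv => pvGg c d kv) q (pvT1 c d) (hne _)]
      unfold pvT1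
      rw [pvGet?_foldl_insert_of_ne _ (fun kv => kv.1) (fun _ kv => pvGn c d kv) q (pvT0 c d) (hne _)]
      unfold pvT0
      rw [pvGet?_foldl_insert_of_ne _ (fun kv => kv.1) (fun _ kv => pvGr d kv) q PySem.Dict.empty (hne _)]
      simp

theorem pvT3_get_other (c : PySem.Dict String Int) (d : PySem.Dict String (List Int))
    (q : String) (h1 : q ≠ "batch_rf") (h2 : q ≠ "batch_gb") :
    (pvT3 c d).get? q = (pvT2 c d).get? q := by
  unfold pvT3
  rw [PySem.Dict.get?_insert_of_ne _ _ h2, PySem.Dict.get?_insert_of_ne _ _ h1]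

-- ---- stage rewrites: A's three scans equal the canonical stages ----
theorem pvStage0_eq (c : PySem.Dict String Int) (d : PySem.Dict String (List Int)) :
    c.items.foldl (fun t kv =>
      if pvHas "rf" kv.1 then t.insert kv.1 (min kv.2 (pvDim d (pvBase kv.1 3))) else t)
      PySem.Dict.empty = pvT0 c d := by
  unfold pvT0
  rw [List.foldl_filter]
  rfl

theorem pvStage1_eq (c : PySem.Dict String Int) (d : PySem.Dict String (List Int))
    (hnd : c.keys.Nodup) (hsh : ∀ k ∈ c.keys, pvShapeKey k) :
    c.items.foldl (fun t kv =>
      if pvHas "noc" kv.1 then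
        t.insert kv.1 (min kv.2 (pvCeilDiv (pvDim d (pvBase kv.1 4)) (t.getD (pvBase kv.1 4 ++ "_rf") 1)))
      else t) (pvT0 c d) = pvT1 c d := by
  rw [← List.foldl_filter]
  unfold pvT1
  refine pvFoldConv (pvHas "rf") (fun kv : String × Int => kv.1) _ (pvGn c d) _ (pvT0 c d) ?_ ?_
  · intro kv hkv
    exact pvShape_noc_rf (pvShape_of_mem c hsh (List.mem_of_mem_filter hkv))
      (by simpa using (List.mem_filter.mp hkv).2)
  · intro t' kv _ hinv
    rw [PySem.Dict.getD_eq_get?_getD, hinv _ (pvHas_rf_append _), pvT0_get c d hnd _ (pvHas_rf_append _)]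
    unfold pvGn pvRfOf pvGr
    cases c.get? (pvBase kv.1 4 ++ "_rf") <;> simp [pvBase_rf]

theorem pvStage2_eq (c : PySem.Dict String Int) (d : PySem.Dict String (List Int))
    (hnd : c.keys.Nodup) (hsh : ∀ k ∈ c.keys, pvShapeKey k) :
    c.items.foldl (fun t kv =>
      if pvHas "gb" kv.1 then
        t.insert kv.1 (min kv.2
          (match t.get? (pvBase kv.1 3 ++ "_noc") with
           | some noc => pvCeilDiv (pvDim d (pvBase kv.1 3)) (noc * t.getD (pvBase kv.1 3 ++ "_rf") 1)
           | none => pvCeilDiv (pvDim d (pvBase kv.1 3)) (t.getD (pvBase kv.1 3 ++ "_rf") 1)))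
      else t) (pvT1 c d) = pvT2 c d := by
  rw [← List.foldl_filter]
  unfold pvT2
  refine pvFoldConv (fun q => pvHas "rf" q || pvHas "noc" q) (fun kv : String × Int => kv.1) _ (pvGg c d) _ (pvT1 c d) ?_ ?_
  · intro kv hkv
    have h2 := pvShape_gb_rf_noc (pvShape_of_mem c hsh (List.mem_of_mem_filter hkv))
      (by simpa using (List.mem_filter.mp hkv).2)
    simp [h2.1, h2.2]
  · intro t' kv _ hinv
    rw [PySem.Dict.getD_eq_get?_getD,
      hinv (pvBase kv.1 3 ++ "_noc") (by simp [pvHas_noc_append]),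
      hinv (pvBase kv.1 3 ++ "_rf") (by simp [pvHas_rf_append]),
      pvT1_get_rf c d hsh _ (pvHas_rf_append _), pvT0_get c d hnd _ (pvHas_rf_append _),
      pvT1_get_noc c d hnd _ (pvHas_noc_append _)]
    simp only [pvGg, pvNocOf, pvGn, pvGr, pvRfOf, PySem.Dict.contains_eq_isSome_get?,
      pvBase_rf, pvBase_noc]
    cases hc2 : c.get? (pvBase kv.1 3 ++ "_noc") <;>
      cases hc3 : c.get? (pvBase kv.1 3 ++ "_rf") <;>
        simp [hc2, hc3]

-- A's interleaved dram loop over the pair splits into two independent folds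
theorem pvPairSplitA (d : PySem.Dict String (List Int)) :
    ∀ (l : List String) (t cc : PySem.Dict String Int),
      l.foldl (fun tc k =>
        (tc.1.insert k
          (match tc.1.get? (pvBase k 5 ++ "_noc") with
           | some noc => pvCeilDiv (pvDim d (pvBase k 5)) (tc.1.getD (pvBase k 5 ++ "_gb") 1 * noc * tc.1.getD (pvBase k 5 ++ "_rf") 1)
           | none => pvCeilDiv (pvDim d (pvBase k 5)) (tc.1.getD (pvBase k 5 ++ "_gb") 1 * tc.1.getD (pvBase k 5 ++ "_rf") 1)),
         tc.2.insert k 1)) (t, cc) =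
      (l.foldl (fun t k =>
        t.insert k
          (match t.get? (pvBase k 5 ++ "_noc") with
           | some noc => pvCeilDiv (pvDim d (pvBase k 5)) (t.getD (pvBase k 5 ++ "_gb") 1 * noc * t.getD (pvBase k 5 ++ "_rf") 1)
           | none => pvCeilDiv (pvDim d (pvBase k 5)) (t.getD (pvBase k 5 ++ "_gb") 1 * t.getD (pvBase k 5 ++ "_rf") 1))) t,
       l.foldl (fun c k => c.insert k 1) cc) := by
  intro l
  induction l with
  | nil => intro t cc; rfl
  | cons k tl ih =>
      intro t cc
      simp only [List.foldl_cons]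
      rw [← ih]

-- the dram value A reads back out of the tiling dict is B's closed form (b ≠ "batch")
theorem pvDramVal_other (c : PySem.Dict String Int) (d : PySem.Dict String (List Int))
    (hnd : c.keys.Nodup) (hsh : ∀ k ∈ c.keys, pvShapeKey k) (t' : PySem.Dict String Int)
    (hinv : ∀ q, (pvHas "rf" q || pvHas "noc" q || pvHas "gb" q) = true → t'.get? q = (pvT3 c d).get? q)
    (b : String)
    (h1 : b ++ "_noc" ≠ "batch_rf") (h2 : b ++ "_noc" ≠ "batch_gb")
    (h3 : b ++ "_gb" ≠ "batch_rf") (h4 : b ++ "_gb" ≠ "batch_gb")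
    (h5 : b ++ "_rf" ≠ "batch_rf") (h6 : b ++ "_rf" ≠ "batch_gb")
    (hb : (b == "batch") = false) :
    (match t'.get? (b ++ "_noc") with
     | some noc => pvCeilDiv (pvDim d b) (t'.getD (b ++ "_gb") 1 * noc * t'.getD (b ++ "_rf") 1)
     | none => pvCeilDiv (pvDim d b) (t'.getD (b ++ "_gb") 1 * t'.getD (b ++ "_rf") 1))
    = pvDramOf c d b := by
  have lnoc : t'.get? (b ++ "_noc") = (c.get? (b ++ "_noc")).map (fun v => pvGn c d (b ++ "_noc", v)) := by
    rw [hinv (b ++ "_noc") (by simp [pvHas_noc_append]), pvT3_get_other c d _ h1 h2,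
      pvT2_get_stable c d hsh _ (Or.inr (pvHas_noc_append b)), pvT1_get_noc c d hnd _ (pvHas_noc_append b)]
  have lgb : t'.get? (b ++ "_gb") = (c.get? (b ++ "_gb")).map (fun v => pvGg c d (b ++ "_gb", v)) := by
    rw [hinv (b ++ "_gb") (by simp [pvHas_gb_append]), pvT3_get_other c d _ h3 h4,
      pvT2_get_gb c d hnd _ (pvHas_gb_append b)]
  have lrf : t'.get? (b ++ "_rf") = (c.get? (b ++ "_rf")).map (fun v => pvGr d (b ++ "_rf", v)) := by
    rw [hinv (b ++ "_rf") (by simp [pvHas_rf_append]), pvT3_get_other c d _ h5 h6,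
      pvT2_get_stable c d hsh _ (Or.inl (pvHas_rf_append b)),
      pvT1_get_rf c d hsh _ (pvHas_rf_append b), pvT0_get c d hnd _ (pvHas_rf_append b)]
  rw [PySem.Dict.getD_eq_get?_getD, PySem.Dict.getD_eq_get?_getD, lnoc, lgb, lrf]
  simp only [pvDramOf, pvGbOf, pvNocOf, pvGg, pvGn, pvGr, pvRfOf,
    PySem.Dict.contains_eq_isSome_get?, pvBase_rf, pvBase_noc, pvBase_gb, hb]
  cases hc2 : c.get? (b ++ "_noc") <;>
    cases hc3 : c.get? (b ++ "_gb") <;>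
      cases hc4 : c.get? (b ++ "_rf") <;>
        simp [hc2, hc3, hc4, mul_assoc]

-- the batch dram row: both batch factors were just pinned to 1
theorem pvDramVal_batch (c : PySem.Dict String Int) (d : PySem.Dict String (List Int))
    (hnd : c.keys.Nodup) (hsh : ∀ k ∈ c.keys, pvShapeKey k) (t' : PySem.Dict String Int)
    (hinv : ∀ q, (pvHas "rf" q || pvHas "noc" q || pvHas "gb" q) = true → t'.get? q = (pvT3 c d).get? q) :
    (match t'.get? ("batch" ++ "_noc") with
     | some noc => pvCeilDiv (pvDim d "batch") (t'.getD ("batch" ++ "_gb") 1 * noc * t'.getD ("batch" ++ "_rf") 1)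
     | none => pvCeilDiv (pvDim d "batch") (t'.getD ("batch" ++ "_gb") 1 * t'.getD ("batch" ++ "_rf") 1))
    = pvDramOf c d "batch" := by
  have lnoc : t'.get? ("batch" ++ "_noc") = (c.get? ("batch" ++ "_noc")).map (fun v => pvGn c d ("batch" ++ "_noc", v)) := by
    rw [hinv ("batch" ++ "_noc") (by decide), pvT3_get_other c d _ (by decide) (by decide),
      pvT2_get_stable c d hsh _ (Or.inr (by decide)), pvT1_get_noc c d hnd _ (by decide)]
  have lgb : t'.get? ("batch" ++ "_gb") = some 1 := by
    rw [hinv ("batch" ++ "_gb") (by decide),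
      show ("batch" ++ "_gb" : String) = "batch_gb" from rfl]
    simp [pvT3, PySem.Dict.get?_insert_self]
  have lrf : t'.get? ("batch" ++ "_rf") = some 1 := by
    rw [hinv ("batch" ++ "_rf") (by decide),
      show ("batch" ++ "_rf" : String) = "batch_rf" from rfl]
    unfold pvT3
    rw [PySem.Dict.get?_insert_of_ne _ _ (by decide)]
    simp [PySem.Dict.get?_insert_self]
  rw [PySem.Dict.getD_eq_get?_getD, PySem.Dict.getD_eq_get?_getD, lnoc, lgb, lrf]
  simp only [pvDramOf, pvNocOf, pvGn, pvGr, pvRfOf,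
    PySem.Dict.contains_eq_isSome_get?, pvBase_noc]
  cases hc2 : c.get? ("batch" ++ "_noc") <;> simp [hc2]

theorem pvDramT_eq (c : PySem.Dict String Int) (d : PySem.Dict String (List Int))
    (hnd : c.keys.Nodup) (hsh : ∀ k ∈ c.keys, pvShapeKey k) :
    pvDramList.foldl (fun t k =>
      t.insert k
        (match t.get? (pvBase k 5 ++ "_noc") with
         | some noc => pvCeilDiv (pvDim d (pvBase k 5)) (t.getD (pvBase k 5 ++ "_gb") 1 * noc * t.getD (pvBase k 5 ++ "_rf") 1)
         | none => pvCeilDiv (pvDim d (pvBase k 5)) (t.getD (pvBase k 5 ++ "_gb") 1 * t.getD (pvBase k 5 ++ "_rf") 1))) (pvT3 c d)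
    = pvDramBases.foldl (fun t b => t.insert (b ++ "_dram") (pvDramOf c d b)) (pvT3 c d) := by
  refine Eq.trans (pvFoldConv (fun q => pvHas "rf" q || pvHas "noc" q || pvHas "gb" q)
    (fun k : String => k) _ (fun k => pvDramOf c d (pvBase k 5)) pvDramList (pvT3 c d) (by decide) ?_) ?_
  · intro t' k hk hinv
    simp only [pvDramList, List.mem_cons, List.not_mem_nil, or_false] at hk
    rcases hk with rfl | rfl | rfl | rfl | rfl | rfl
    · exact pvDramVal_other c d hnd hsh t' hinv "col_out" (by decide) (by decide) (by decide) (by decide) (by decide) (by decide) (by decide)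
    · exact pvDramVal_other c d hnd hsh t' hinv "ch_out" (by decide) (by decide) (by decide) (by decide) (by decide) (by decide) (by decide)
    · exact pvDramVal_batch c d hnd hsh t' hinv
    · exact pvDramVal_other c d hnd hsh t' hinv "row_out" (by decide) (by decide) (by decide) (by decide) (by decide) (by decide) (by decide)
    · exact pvDramVal_other c d hnd hsh t' hinv "col_kernel" (by decide) (by decide) (by decide) (by decide) (by decide) (by decide) (by decide)
    · exact pvDramVal_other c d hnd hsh t' hinv "row_kernel" (by decide) (by decide) (by decide) (by decide) (by decide) (by decide) (by decide)
  · rfl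

-- ---- B's classifying pass produces exactly the three rows ----
theorem pvRows_aux (c : PySem.Dict String Int) (d : PySem.Dict String (List Int)) :
    ∀ (l : List (String × Int)), (∀ kv ∈ l, pvShapeKey kv.1) →
    ∀ (a bb cc : List (String × Int)),
      l.foldl (pvRowsStep c d) (a, bb, cc) =
        (a ++ (l.filter (fun kv => pvHas "rf" kv.1)).map (fun kv => (kv.1, pvGr d kv)),
         bb ++ (l.filter (fun kv => pvHas "noc" kv.1)).map (fun kv => (kv.1, pvGn c d kv)),
         cc ++ (l.filter (fun kv => pvHas "gb" kv.1)).map (fun kv => (kv.1, pvGg c d kv))) := by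
  intro l
  induction l with
  | nil => intro _ a bb cc; simp
  | cons kv tl ih =>
      intro hl a bb cc
      have hsk := hl kv (List.mem_cons_self)
      have htl := fun x hx => hl x (List.mem_cons_of_mem _ hx)
      simp only [List.foldl_cons, List.filter_cons]
      by_cases hrf : pvHas "rf" kv.1 = true
      · have hno := (hsk.1 hrf).1
        have hgb := (hsk.1 hrf).2
        rw [show pvRowsStep c d (a, bb, cc) kv =
            (a ++ [(kv.1, pvGr d kv)], bb, cc) from by simp [pvRowsStep, hrf, pvGr]]
        rw [ih htl]
        simp [hrf, hno, hgb]
      · by_cases hno : pvHas "noc" kv.1 = true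
        · have hgb := hsk.2 hno
          rw [show pvRowsStep c d (a, bb, cc) kv =
              (a, bb ++ [(kv.1, pvGn c d kv)], cc) from by simp [pvRowsStep, hrf, hno, pvGn, pvRfOf]]
          rw [ih htl]
          simp [hrf, hno, hgb]
        · by_cases hgb : pvHas "gb" kv.1 = true
          · rw [show pvRowsStep c d (a, bb, cc) kv =
                (a, bb, cc ++ [(kv.1, pvGg c d kv)]) from by simp [pvRowsStep, hrf, hno, hgb, pvGg, pvNocOf, pvRfOf]]
            rw [ih htl]
            simp [hrf, hno, hgb]
          · rw [show pvRowsStep c d (a, bb, cc) kv = (a, bb, cc) from by simp [pvRowsStep, hrf, hno, hgb]]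
            rw [ih htl]
            simp [hrf, hno, hgb]

theorem pvTbuild_eq (c : PySem.Dict String Int) (d : PySem.Dict String (List Int)) :
    PySem.Dict.ofList
      (((c.items.filter (fun kv => pvHas "rf" kv.1)).map (fun kv => (kv.1, pvGr d kv)) ++
        (c.items.filter (fun kv => pvHas "noc" kv.1)).map (fun kv => (kv.1, pvGn c d kv))) ++
       (c.items.filter (fun kv => pvHas "gb" kv.1)).map (fun kv => (kv.1, pvGg c d kv))) = pvT2 c d := by
  have hof : ∀ (l : List (String × Int)),
      PySem.Dict.ofList l = l.foldl (fun t p => t.insert p.1 p.2) PySem.Dict.empty := fun _ => rfl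
  rw [hof, List.foldl_append, List.foldl_append, List.foldl_map, List.foldl_map, List.foldl_map]
  rfl

theorem pvLayerB_eq_T (c : PySem.Dict String Int) (d : PySem.Dict String (List Int))
    (hsh : ∀ k ∈ c.keys, pvShapeKey k) :
    pvLayerB c d = pvDramBases.foldl (fun t b => t.insert (b ++ "_dram") (pvDramOf c d b)) (pvT3 c d) := by
  unfold pvLayerB
  rw [pvRows_aux c d c.items (fun kv h => pvShape_of_mem c hsh h) [] [] []]
  simp only [List.nil_append]
  rw [pvTbuild_eq c d]
  rfl

-- ---- per-layer equality (proof) ----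
theorem pvLayerA_eq (c : PySem.Dict String Int) (d : PySem.Dict String (List Int))
    (hnd : c.keys.Nodup) (hsh : ∀ k ∈ c.keys, pvShapeKey k) :
    pvLayerA c d = (pvLayerB c d, pvMutB c) := by
  unfold pvLayerA
  simp only [pvStage0_eq c d, pvStage1_eq c d hnd hsh, pvStage2_eq c d hnd hsh]
  rw [pvPairSplitA d pvDramList]
  rw [show ((pvT2 c d).insert "batch_rf" 1).insert "batch_gb" 1 = pvT3 c d from rfl]
  rw [pvDramT_eq c d hnd hsh, ← pvLayerB_eq_T c d hsh]
  rfl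

-- ---- preservation of the hypotheses across A's/B's consumption-dict mutation ----
theorem pvKeys_foldl_insert_mem : ∀ (l : List String) (c : PySem.Dict String Int) (k : String),
    k ∈ (l.foldl (fun c b => c.insert (b ++ "_dram") (1 : Int)) c).keys →
    k ∈ c.keys ∨ k ∈ l.map (fun b => b ++ "_dram") := by
  intro l
  induction l with
  | nil => intro c k hk; exact Or.inl hk
  | cons b tl ih =>
      intro c k hk
      rcases ih _ _ hk with h | h
      · rw [PySem.Dict.mem_keys_insert] at h
        rcases h with h | h
        · exact Or.inr (by simp [h])
        · exact Or.inl h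
      · exact Or.inr (by simp at h ⊢; tauto)

theorem pvMutB_nodup (c : PySem.Dict String Int) (hnd : c.keys.Nodup) : (pvMutB c).keys.Nodup := by
  unfold pvMutB
  exact PySem.Dict.nodup_keys_foldl_insert_key pvDramBases (fun b => b ++ "_dram") (fun _ _ => 1) _
    (PySem.Dict.nodup_keys_insert _ _ _ (PySem.Dict.nodup_keys_insert _ _ _ hnd))
theorem pvMutB_shape (c : PySem.Dict String Int) (hsh : ∀ k ∈ c.keys, pvShapeKey k) :
    ∀ k ∈ (pvMutB c).keys, pvShapeKey k := by
  intro k hk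
  unfold pvMutB at hk
  rcases pvKeys_foldl_insert_mem pvDramBases _ k hk with h | h
  · rw [PySem.Dict.mem_keys_insert] at h
    rcases h with rfl | h
    · decide
    · rw [PySem.Dict.mem_keys_insert] at h
      rcases h with rfl | h
      · decide
      · exact hsh k h
  · simp only [pvDramBases, List.map_cons, List.map_nil, List.mem_cons, List.not_mem_nil, or_false] at h
    rcases h with rfl | rfl | rfl | rfl | rfl | rfl <;> decide

-- ---- the layer loop ----
theorem pvLayers_eq (layers : List (Int × (List (String × List Int)))) :
    ∀ (ts : List (PySem.Dict String Int)) (c : PySem.Dict String Int),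
      c.keys.Nodup → (∀ k ∈ c.keys, pvShapeKey k) →
      layers.foldl (fun acc layer =>
          let s := pvLayerA acc.2 (PySem.Dict.ofList layer.2)
          (acc.1 ++ [s.1], s.2)) (ts, c) =
      (ts ++ (pvLayersB c layers).1, (pvLayersB c layers).2) := by
  induction layers with
  | nil => intro ts c _ _; simp [pvLayersB]
  | cons layer rest ih =>
      intro ts c hnd hsh
      simp only [List.foldl_cons, pvLayerA_eq c (PySem.Dict.ofList layer.2) hnd hsh]
      rw [ih _ _ (pvMutB_nodup c hnd) (pvMutB_shape c hsh)]
      simp [pvLayersB]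

-- ===== VERDICT (by name: the statement is the Claim_ definition above) =====
theorem tiling_translation_dw_spec : Claim_equal_tiling_translation_dw := by
  intro consumption_dict input_dnn _ hpre
  unfold Spec_tiling_translation_dw tiling_translation_dw tiling_translation_dw_alt
  rcases hpre with hnil | ⟨hsh, _⟩
  · subst hnil; simp [pvLayersB]
  · rw [pvLayers_eq input_dnn [] (PySem.Dict.ofList consumption_dict)
      (PySem.Dict.nodup_keys_ofList consumption_dict) hsh]
    simp
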